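-- pv_equiv track=rewrite | github.com/lauracarpaciu/Algoritmii | Sortare.py | mostWins
-- ===== SOURCE A (Python) =====
-- def hasonlyWins(list,left,right):
--    for i in range(left,right):
--        if list[i]!="W":
--            return False
--    return True
--
-- def mostWins(list):
--     mostWin=0
--     for left in range(0,len(list)):
--         for right in range(left,len(list)):
--             if hasonlyWins(list,left,right):
--                 wins=right-left
--                 if wins>mostWin:
--                     mostWin=wins
--     return mostWin
-- ===== SOURCE B (Python) =====
-- def mostWins(list):
--     best = 0
--     cur = 0
--     for game in list:
--         if game == "W":
--             cur += 1
--             if cur > best: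
--                 best = cur
--         else:
--             cur = 0
--     return best
-- ===== Notes on version B (the rewrite author's own statement) =====
-- stated objective: faster
-- what changed: Replaced the triple loop (all (left,right) pairs, each rescanned element by element) by a single pass that tracks the current consecutive-'W' streak and the best streak seen.
-- intended difference: On lists whose trailing block of 'W's is nonempty and strictly longer than every 'W'-run among the first n-1 elements (e.g. ['W']), A returns that run length minus one (its inner bound stops one short of the end, so A in fact computes the longest run of list[:-1]) while B returns the true longest consecutive-'W' run length, which is what 'most wins' means. — e.g. on mostWins(["W"]): A returns 0, B returns 1
import Mathlib
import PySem

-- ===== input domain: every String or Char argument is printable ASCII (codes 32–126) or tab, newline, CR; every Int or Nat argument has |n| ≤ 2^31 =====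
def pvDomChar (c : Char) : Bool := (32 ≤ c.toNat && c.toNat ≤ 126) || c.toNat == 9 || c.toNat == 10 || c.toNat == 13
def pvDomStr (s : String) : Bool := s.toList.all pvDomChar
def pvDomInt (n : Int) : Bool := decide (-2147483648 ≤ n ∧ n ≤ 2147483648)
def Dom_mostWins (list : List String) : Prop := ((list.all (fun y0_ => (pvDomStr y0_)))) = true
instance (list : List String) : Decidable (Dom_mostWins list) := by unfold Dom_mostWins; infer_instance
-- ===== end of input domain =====

-- B replaces A's O(n^3) all-pairs rescan by one O(n) pass over the list tracking the
-- current and best consecutive-"W" streak; A's inner bound stops one element short of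
-- the end, so A and B differ exactly on the inputs described at D_mostWins below.

-- ===== PORT A =====
-- list[i] is only evaluated at indices produced by range(left,right) with
-- 0 ≤ left ≤ i < right ≤ len(list), so pyGetD is exact here (never out of range).
def hwLoop (list : List String) : List Int → Bool
  | [] => true
  | i :: rest => if (PySem.List.pyGetD list i "") ≠ "W" then false else hwLoop list rest

def hasonlyWins (list : List String) (left right : Int) : Bool :=
  hwLoop list (PySem.List.pyRange left right 1)

def mostWins (list : List String) : Int :=
  (PySem.List.pyRange 0 (list.length : Int) 1).foldl (fun mostWin left =>
    (PySem.List.pyRange left (list.length : Int) 1).foldl (fun mostWin right =>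
      if hasonlyWins list left right then
        (if right - left > mostWin then right - left else mostWin)
      else mostWin) mostWin) 0

-- ===== PORT B =====
def mostWins_alt (list : List String) : Int :=
  (list.foldl (fun (s : Int × Int) game =>
      if game = "W" then
        (if s.2 + 1 > s.1 then s.2 + 1 else s.1, s.2 + 1)
      else (s.1, 0)) (0, 0)).1

-- ===== PRECONDITION & SPEC =====
-- rfW l = length of the "W"-prefix of l (used only to state D_; independent of both ports).
def rfW : List String → Nat
  | [] => 0
  | x :: xs => if x = "W" then rfW xs + 1 else 0

-- On lists whose trailing block of "W"s is nonempty and strictly longer than every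
-- "W"-run among the first n-1 elements (e.g. ["W"]), A returns that run length minus one
-- (its inner loop bound stops one short of the end: A computes the longest run of
-- list[:-1]) while B returns the true longest consecutive-"W" run, the intended value.
def D_mostWins (list : List String) : Prop :=
  0 < rfW list.reverse ∧
    ∀ a < list.length, a + rfW list.reverse + 1 ≤ list.length →
      rfW (list.drop a) < rfW list.reverse

instance (list : List String) : Decidable (D_mostWins list) := by
  unfold D_mostWins; infer_instance

def Spec_mostWins (list : List String) (out : Int) : Prop :=
  ¬ D_mostWins list → out = mostWins_alt list

instance (list : List String) (out : Int) : Decidable (Spec_mostWins list out) := by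
  unfold Spec_mostWins; infer_instance

def pvDiffWitness_mostWins : List String := (["W"])
def pvDiffWitnessOut_mostWins : Int × Int := (0, 1)

-- ===== CLAIM (what is proved, stated in full; the proofs are below) =====
def Claim_unchanged_mostWins : Prop := ∀ (list : List String), Dom_mostWins list → Spec_mostWins list (mostWins list)
def Claim_changed_mostWins : Prop := Dom_mostWins (pvDiffWitness_mostWins) ∧ D_mostWins (pvDiffWitness_mostWins) ∧ mostWins (pvDiffWitness_mostWins) = pvDiffWitnessOut_mostWins.1 ∧ mostWins_alt (pvDiffWitness_mostWins) = pvDiffWitnessOut_mostWins.2 ∧ pvDiffWitnessOut_mostWins.1 ≠ pvDiffWitnessOut_mostWins.2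
def Claim_exact_mostWins : Prop := ∀ (list : List String), Dom_mostWins list → D_mostWins list → mostWins list ≠ mostWins_alt list

-- ===== LEMMAS AND PROOFS =====

-- generic max-fold toolkit (over Nat)
theorem foldl_max_init (f : Nat → Nat) (l : List Nat) (m : Nat) :
    l.foldl (fun m a => max m (f a)) m = max m (l.foldl (fun m a => max m (f a)) 0) := by
  induction l generalizing m with
  | nil => simp
  | cons x xs ih =>
    simp only [List.foldl_cons]
    rw [ih (max m (f x)), ih (max 0 (f x))]
    omega

theorem foldl_max_le_iff (f : Nat → Nat) (l : List Nat) (c : Nat) :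
    l.foldl (fun m a => max m (f a)) 0 ≤ c ↔ ∀ a ∈ l, f a ≤ c := by
  induction l with
  | nil => simp
  | cons x xs ih =>
    simp only [List.foldl_cons, List.mem_cons]
    rw [foldl_max_init]
    constructor
    · rintro h a (rfl | ha)
      · omega
      · exact (ih.mp (by omega)) a ha
    · intro h
      have := ih.mpr (fun a ha => h a (Or.inr ha))
      have := h x (Or.inl rfl)
      omega

theorem le_foldl_max (f : Nat → Nat) (l : List Nat) (a : Nat) (ha : a ∈ l) :
    f a ≤ l.foldl (fun m a => max m (f a)) 0 :=
  (foldl_max_le_iff f l _).mp le_rfl a ha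

-- rfW facts
theorem rfW_le_length (l : List String) : rfW l ≤ l.length := by
  induction l with
  | nil => simp [rfW]
  | cons x xs ih => simp only [rfW, List.length_cons]; split <;> omega

theorem rfW_eq_length_iff (l : List String) : rfW l = l.length ↔ ∀ x ∈ l, x = "W" := by
  induction l with
  | nil => simp [rfW]
  | cons x xs ih =>
    by_cases hx : x = "W"
    · simp only [rfW, if_pos hx, List.length_cons, List.mem_cons]
      constructor
      · rintro h a (rfl | ha)
        · exact hx
        · exact (ih.mp (by omega)) a ha
      · intro h
        have := ih.mpr (fun a ha => h a (Or.inr ha))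
        omega
    · simp only [rfW, if_neg hx, List.length_cons, List.mem_cons]
      have := rfW_le_length xs
      constructor
      · intro h; exact absurd h (by omega)
      · intro h; exact absurd (h x (Or.inl rfl)) hx

theorem rfW_append (u v : List String) :
    rfW (u ++ v) = if rfW u = u.length then u.length + rfW v else rfW u := by
  induction u with
  | nil => simp [rfW]
  | cons x xs ih =>
    simp only [List.cons_append, rfW, List.length_cons]
    by_cases hx : x = "W"
    · simp only [if_pos hx, ih]
      have := rfW_le_length xs
      split <;> split <;> omega
    · simp only [if_neg hx]
      have := rfW_le_length xs
      rw [if_neg (by omega)]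

theorem take_rfW_allW (l : List String) : ∀ x ∈ l.take (rfW l), x = "W" := by
  induction l with
  | nil => simp
  | cons y ys ih =>
    by_cases hy : y = "W"
    · simp only [rfW, if_pos hy, List.take_succ_cons, List.mem_cons]
      rintro x (rfl | hx)
      · exact hy
      · exact ih x hx
    · simp [rfW, if_neg hy]

-- the trailing "W"-block: rfW l.reverse many "W"s at the end of l
theorem trail_drop (l : List String) :
    rfW (l.drop (l.length - rfW l.reverse)) = rfW l.reverse := by
  have ht : rfW l.reverse ≤ l.length := by
    have := rfW_le_length l.reverse; simpa using this
  have hall : ∀ x ∈ l.drop (l.length - rfW l.reverse), x = "W" := by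
    intro x hx
    apply take_rfW_allW l.reverse
    rw [List.take_reverse]
    exact List.mem_reverse.mpr hx
  have := (rfW_eq_length_iff (l.drop (l.length - rfW l.reverse))).mpr hall
  rw [this, List.length_drop]
  omega

theorem suffix_trail (l : List String) (a : Nat) (ha : a ≤ l.length)
    (h : rfW (l.drop a) = l.length - a) : l.length - a ≤ rfW l.reverse := by
  have hall : ∀ x ∈ l.drop a, x = "W" := by
    apply (rfW_eq_length_iff (l.drop a)).mp
    rw [h, List.length_drop]
  have hsplit : l.reverse = (l.drop a).reverse ++ (l.take a).reverse := by
    conv_lhs => rw [← List.take_append_drop a l]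
    rw [List.reverse_append]
  have hrev : rfW (l.drop a).reverse = (l.drop a).reverse.length := by
    apply (rfW_eq_length_iff _).mpr
    intro x hx; exact hall x (List.mem_reverse.mp hx)
  rw [hsplit, rfW_append, if_pos hrev, List.length_reverse, List.length_drop]
  omega

-- characterisation of the A port
theorem hasonly_char (list : List String) (a k : Nat) (h : a + k ≤ list.length) :
    hasonlyWins list (a : Int) ((a : Int) + (k : Int)) = decide (k ≤ rfW (list.drop a)) := by
  induction k generalizing a with
  | zero =>
    simp only [Nat.cast_zero, add_zero, hasonlyWins]
    rw [PySem.List.pyRange_one_eq_nil (by omega)]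
    simp [hwLoop]
  | succ k ih =>
    have halt : a < list.length := by omega
    simp only [hasonlyWins] at ih ⊢
    rw [PySem.List.pyRange_one_cons (by push_cast; omega)]
    simp only [hwLoop]
    have hget : PySem.List.pyGetD list (a : Int) "" = list[a] :=
      PySem.List.pyGetD_ofNat list a "" halt
    have hdrop : list.drop a = list[a] :: list.drop (a + 1) :=
      (List.getElem_cons_drop halt).symm
    by_cases hw : list[a] = "W"
    · rw [hget, if_neg (by simp [hw])]
      rw [show ((a : Int) + ((k + 1 : Nat) : Int)) = ((a + 1 : Nat) : Int) + (k : Int) by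
            push_cast; ring,
          show ((a : Int) + 1) = ((a + 1 : Nat) : Int) by push_cast; ring]
      rw [ih (a + 1) (by omega)]
      rw [hdrop]
      simp only [rfW, if_pos hw, decide_eq_decide]
      omega
    · rw [hget, if_pos (by simp [hw])]
      rw [hdrop]
      simp [rfW, hw]

theorem hasonly_char' (list : List String) (a b : Nat) (hab : a ≤ b) (h : b ≤ list.length) :
    hasonlyWins list (a : Int) (b : Int) = decide (b - a ≤ rfW (list.drop a)) := by
  have := hasonly_char list a (b - a) (by omega)
  rwa [show ((a : Int) + ((b - a : Nat) : Int)) = (b : Int) by push_cast; omega] at this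

theorem inner_char (list : List String) (a : Nat) (ha : a < list.length) :
    ∀ (k : Nat) (b : Nat) (m : Int), list.length ≤ b + k → a ≤ b → 0 ≤ m →
    (PySem.List.pyRange (b : Int) (list.length : Int) 1).foldl
      (fun mostWin right =>
        if hasonlyWins list (a : Int) right then
          (if right - (a : Int) > mostWin then right - (a : Int) else mostWin)
        else mostWin) m
    = max m (((if b ≤ a + rfW (list.drop a) ∧ b < list.length then
        min (rfW (list.drop a)) (list.length - 1 - a) else 0 : Nat) : Int)) := by
  intro k
  induction k with
  | zero =>
    intro b m hb hab hm
    rw [PySem.List.pyRange_one_eq_nil (by push_cast; omega)]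
    simp only [List.foldl_nil]
    rw [if_neg (by omega), Nat.cast_zero, max_eq_left hm]
  | succ k ih =>
    intro b m hb hab hm
    by_cases hbn : b < list.length
    · rw [PySem.List.pyRange_one_cons (by push_cast; omega)]
      simp only [List.foldl_cons]
      rw [hasonly_char' list a b hab (by omega)]
      set r := rfW (list.drop a) with hr
      have hrle : r ≤ list.length - a := by
        have := rfW_le_length (list.drop a)
        simp only [List.length_drop] at this; omega
      by_cases hgood : b - a ≤ r
      · rw [if_pos (by simpa using hgood)]
        set m' : Int := if (b : Int) - (a : Int) > m then (b : Int) - (a : Int) else m with hm'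
        have hm'0 : 0 ≤ m' := by rw [hm']; split_ifs <;> omega
        have he1 : list.length ≤ (b + 1) + k := by omega
        have he2 : a ≤ b + 1 := by omega
        rw [show ((b : Int) + 1) = ((b + 1 : Nat) : Int) by push_cast; ring]
        rw [ih (b + 1) m' he1 he2 hm'0]
        by_cases hc : b + 1 ≤ a + r ∧ b + 1 < list.length
        · rw [if_pos hc, if_pos (show b ≤ a + r ∧ b < list.length from ⟨by omega, hbn⟩)]
          have hba : (b : Int) - (a : Int)
              ≤ ((min r (list.length - 1 - a) : Nat) : Int) := by push_cast; omega
          rw [hm', max_def, max_def]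
          split_ifs <;> omega
        · rw [if_neg hc, if_pos (show b ≤ a + r ∧ b < list.length from ⟨by omega, hbn⟩)]
          have hba : ((min r (list.length - 1 - a) : Nat) : Int) = (b : Int) - (a : Int) := by
            push_cast; omega
          rw [hm', hba, Nat.cast_zero, max_def, max_def]
          split_ifs <;> omega
      · rw [if_neg (by simpa using hgood)]
        rw [show ((b : Int) + 1) = ((b + 1 : Nat) : Int) by push_cast; ring]
        rw [ih (b + 1) m (by omega) (by omega) hm]
        rw [if_neg (by omega), if_neg (by omega)]
    · rw [PySem.List.pyRange_one_eq_nil (by push_cast; omega)]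
      simp only [List.foldl_nil]
      rw [if_neg (by omega), Nat.cast_zero, max_eq_left hm]

-- Nat-level values of the two ports
def NA (list : List String) : Nat :=
  (List.range list.length).foldl
    (fun m a => max m (min (rfW (list.drop a)) (list.length - 1 - a))) 0

def M2 : List String → Nat
  | [] => 0
  | x :: xs => max (rfW (x :: xs)) (M2 xs)

theorem cast_fold_max (f : Nat → Nat) (l : List Nat) (m : Nat) :
    l.foldl (fun (m : Int) a => max m ((f a : Nat) : Int)) (m : Int)
      = ((l.foldl (fun m a => max m (f a)) m : Nat) : Int) := by
  induction l generalizing m with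
  | nil => simp
  | cons x xs ih =>
    simp only [List.foldl_cons]
    rw [← Nat.cast_max, ih]

theorem foldl_inv_congr (l : List Nat) (f g : Int → Nat → Int) (init : Int)
    (h0 : 0 ≤ init)
    (hfg : ∀ (m : Int) (a : Nat), 0 ≤ m → a ∈ l → f m a = g m a ∧ 0 ≤ g m a) :
    l.foldl f init = l.foldl g init := by
  induction l generalizing init with
  | nil => rfl
  | cons x xs ih =>
    simp only [List.foldl_cons]
    obtain ⟨heq, hpos⟩ := hfg init x h0 List.mem_cons_self
    rw [heq]
    exact ih (g init x) hpos (fun m a hm ha => hfg m a hm (List.mem_cons_of_mem x ha))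

theorem mostWins_eq_NA (list : List String) : mostWins list = (NA list : Int) := by
  unfold mostWins NA
  rw [PySem.List.pyRange_one 0 (list.length : Int)]
  simp only [sub_zero, Int.toNat_natCast, List.foldl_map, zero_add]
  rw [foldl_inv_congr (List.range list.length) _
      (fun (m : Int) (k : Nat) =>
        max m (((min (rfW (list.drop k)) (list.length - 1 - k) : Nat) : Int))) 0 le_rfl ?_]
  · exact cast_fold_max _ _ 0
  · intro m k hm hk
    have hkn : k < list.length := List.mem_range.mp hk
    constructor
    · have := inner_char list k hkn (list.length - k) k m (by omega) le_rfl hm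
      rw [this, if_pos ⟨by omega, hkn⟩]
    · positivity

def natFold : List String → Nat → Nat → Nat
  | [], best, _ => best
  | x :: xs, best, cur =>
      if x = "W" then natFold xs (max best (cur + 1)) (cur + 1) else natFold xs best 0

theorem alt_foldl (l : List String) : ∀ (best cur : Nat),
    (l.foldl (fun (s : Int × Int) game =>
      if game = "W" then
        (if s.2 + 1 > s.1 then s.2 + 1 else s.1, s.2 + 1)
      else (s.1, 0)) ((best : Int), (cur : Int))).1 = ((natFold l best cur : Nat) : Int) := by
  induction l with
  | nil => intro best cur; simp [natFold]
  | cons x xs ih =>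
    intro best cur
    simp only [List.foldl_cons, natFold]
    by_cases hx : x = "W"
    · rw [if_pos hx, if_pos hx]
      have h1 : ((cur : Int) + 1) = ((cur + 1 : Nat) : Int) := by push_cast; ring
      have h2 : (if (cur : Int) + 1 > (best : Int) then (cur : Int) + 1 else (best : Int))
          = ((max best (cur + 1) : Nat) : Int) := by
        rw [Nat.max_def]; split_ifs <;> push_cast at * <;> omega
      rw [h2, h1, ih]
    · rw [if_neg hx, if_neg hx]
      have := ih best 0
      rw [Nat.cast_zero] at this
      exact this

theorem rfW_le_M2 (l : List String) : rfW l ≤ M2 l := by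
  cases l with
  | nil => simp [rfW, M2]
  | cons x xs => simp [M2]

theorem natFold_char (l : List String) : ∀ (best cur : Nat),
    natFold l best cur
      = max best (max (if 0 < rfW l then cur + rfW l else 0) (M2 l)) := by
  induction l with
  | nil => intro best cur; simp [natFold, rfW, M2]
  | cons x xs ih =>
    intro best cur
    have hle := rfW_le_M2 xs
    by_cases hx : x = "W"
    · simp only [natFold, if_pos hx, ih, rfW, M2]
      by_cases h0 : 0 < rfW xs <;>
        simp only [h0, if_pos, if_neg, if_true, if_false, hx, ite_true] <;>
        · simp only [Nat.max_def]; split_ifs <;> omega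
    · simp only [natFold, if_neg hx, ih, rfW, M2]
      by_cases h0 : 0 < rfW xs <;>
        simp only [h0, hx, ite_true, ite_false, if_neg, if_pos] <;>
        · simp only [Nat.max_def]; split_ifs <;> omega

theorem alt_eq_M2 (list : List String) : mostWins_alt list = (M2 list : Int) := by
  unfold mostWins_alt
  have h0 : ((0 : Int), (0 : Int)) = (((0 : Nat) : Int), ((0 : Nat) : Int)) := rfl
  rw [h0, alt_foldl list 0 0, natFold_char]
  have hle := rfW_le_M2 list
  congr 1
  split_ifs <;> simp only [Nat.max_def] <;> split_ifs <;> omega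

theorem M2_le_iff (l : List String) (c : Nat) :
    M2 l ≤ c ↔ ∀ a < l.length, rfW (l.drop a) ≤ c := by
  induction l with
  | nil => simp [M2]
  | cons x xs ih =>
    simp only [M2, max_le_iff, ih, List.length_cons]
    constructor
    · rintro ⟨h0, hs⟩ a ha
      cases a with
      | zero => simpa using h0
      | succ a => simpa using hs a (by omega)
    · intro h
      refine ⟨by simpa using h 0 (by omega), fun a ha => ?_⟩
      simpa using h (a + 1) (by omega)

theorem le_M2 (l : List String) (a : Nat) (ha : a < l.length) : rfW (l.drop a) ≤ M2 l :=
  (M2_le_iff l _).mp le_rfl a ha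

-- core comparison
theorem NA_eq_M2_of_not_D (list : List String) (h : ¬ D_mostWins list) :
    NA list = M2 list := by
  apply le_antisymm
  · unfold NA
    rw [foldl_max_le_iff]
    intro a ha
    exact le_trans (min_le_left _ _) (le_M2 list a (List.mem_range.mp ha))
  · rw [M2_le_iff]
    intro a ha
    have hrle : rfW (list.drop a) ≤ list.length - a := by
      have := rfW_le_length (list.drop a)
      simpa [List.length_drop] using this
    by_cases hin : a + rfW (list.drop a) + 1 ≤ list.length
    · have hmin : min (rfW (list.drop a)) (list.length - 1 - a) = rfW (list.drop a) := by omega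
      have := le_foldl_max
        (fun a => min (rfW (list.drop a)) (list.length - 1 - a))
        (List.range list.length) a (List.mem_range.mpr ha)
      unfold NA
      simpa [hmin] using this
    · have hreq : rfW (list.drop a) = list.length - a := by omega
      have htw : list.length - a ≤ rfW list.reverse :=
        suffix_trail list a (le_of_lt ha) hreq
      unfold D_mostWins at h
      push_neg at h
      obtain ⟨a0, ha0, hle0, hge0⟩ := h (by omega)
      have hkey : rfW list.reverse ≤ min (rfW (list.drop a0)) (list.length - 1 - a0) :=
        le_min (by omega) (by omega)
      have h5 := le_foldl_max
        (fun a => min (rfW (list.drop a)) (list.length - 1 - a))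
        (List.range list.length) a0 (List.mem_range.mpr ha0)
      simp only at h5
      unfold NA
      omega

theorem NA_lt_M2_of_D (list : List String) (h : D_mostWins list) :
    NA list < M2 list := by
  obtain ⟨hpos, hall⟩ := h
  have htn : rfW list.reverse ≤ list.length := by
    have := rfW_le_length list.reverse
    simpa using this
  have h1 : rfW list.reverse ≤ M2 list := by
    have := trail_drop list
    have hlt : list.length - rfW list.reverse < list.length := by omega
    have := le_M2 list (list.length - rfW list.reverse) hlt
    omega
  have h2 : NA list ≤ rfW list.reverse - 1 := by
    unfold NA
    rw [foldl_max_le_iff]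
    intro a ha
    have ha' := List.mem_range.mp ha
    by_contra hc
    have hge : rfW list.reverse ≤ min (rfW (list.drop a)) (list.length - 1 - a) := by omega
    have h3 := hge.trans (min_le_left (rfW (list.drop a)) (list.length - 1 - a))
    have h4 := hge.trans (min_le_right (rfW (list.drop a)) (list.length - 1 - a))
    have := hall a ha' (by omega)
    omega
  omega

-- ===== VERDICT (by name: the statement is the Claim_ definition above) =====
theorem mostWins_spec : Claim_unchanged_mostWins := by
  intro list _ hnD
  rw [mostWins_eq_NA, alt_eq_M2, NA_eq_M2_of_not_D list hnD]

theorem mostWins_changed : Claim_changed_mostWins := by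
  unfold Claim_changed_mostWins; decide

theorem mostWins_tight : Claim_exact_mostWins := by
  intro list _ hD
  rw [mostWins_eq_NA, alt_eq_M2]
  have := NA_lt_M2_of_D list hD
  intro hc
  exact absurd (by exact_mod_cast hc) (Nat.ne_of_lt this)
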